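-- pv_equiv track=rewrite | github.com/umr-ds/ElasticHash | experiments/util.py | reorder_code
-- ===== SOURCE A (Python) =====
-- def reorder_code(bitstring, weights, order="desc"):
--     """
--     Reorders bitcode by sorting subcodes according to weights
--     :param bitstring: str
--     :param weights: list of weights (one for each subcode)
--     :param order: asc or desc
--     :return: reordered bitstring
--     """
--     num_sc = len(weights)
--     if (len(bitstring) % num_sc != 0):
--         raise ("Error: Bitstring must be divideable by number of weights")
--     len_sc = len(bitstring) // num_sc
--     _, order = zip(*sorted(zip(weights, range(num_sc)), reverse=(order == "desc")))
--     new_bitstring = ""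
--     for i in range(len(bitstring)):
--         new_bitstring += bitstring[(i % len_sc) + order[i // len_sc] * len_sc]
--     return new_bitstring
-- ===== SOURCE B (Python) =====
-- def reorder_code(bitstring, weights, order="desc"):
--     num_sc = len(weights)
--     if (len(bitstring) % num_sc != 0):
--         raise ("Error: Bitstring must be divideable by number of weights")
--     len_sc = len(bitstring) // num_sc
--     chunks = []
--     s = bitstring
--     while s:
--         chunks.append(s[:len_sc])
--         s = s[len_sc:]
--     decorated = sorted(zip(weights, range(num_sc), chunks), reverse=(order == "desc"))
--     return "".join(c for _, _, c in decorated)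
-- ===== Notes on version B (the rewrite author's own statement) =====
-- stated objective: alternative
-- what changed: B splits the bitstring into chunks with a while loop, decorates them as (weight, index, chunk) triples, sorts the triples once (decorate-sort-undecorate) and joins the chunk components, replacing A's separate permutation extraction plus character-by-character loop with modular index arithmetic.
import Mathlib
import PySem

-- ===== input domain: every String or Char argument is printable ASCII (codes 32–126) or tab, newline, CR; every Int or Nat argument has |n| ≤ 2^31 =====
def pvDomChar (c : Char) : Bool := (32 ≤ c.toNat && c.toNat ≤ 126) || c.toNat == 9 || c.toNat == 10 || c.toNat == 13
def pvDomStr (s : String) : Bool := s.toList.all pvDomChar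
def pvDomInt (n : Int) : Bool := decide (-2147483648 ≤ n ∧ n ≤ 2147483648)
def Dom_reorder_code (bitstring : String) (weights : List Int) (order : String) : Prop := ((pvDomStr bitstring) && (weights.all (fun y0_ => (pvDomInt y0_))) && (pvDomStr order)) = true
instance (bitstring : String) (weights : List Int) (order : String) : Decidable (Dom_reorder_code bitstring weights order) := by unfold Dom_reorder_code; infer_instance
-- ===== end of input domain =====

-- B is a decorate-sort-undecorate rewrite: it slices the bitstring into chunks with a while
-- loop, sorts (weight, index, chunk) triples once and joins the chunk components, replacing
-- A's permutation extraction plus per-character loop with modular index arithmetic (alternative).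

-- ===== PORT A =====
-- A: permutation from sorting (weight, index) pairs, then one character at a time.
def reorder_code (bitstring : String) (weights : List Int) (order : String) : String :=
  let cs := bitstring.toList
  let num_sc := weights.length
  if cs.length % num_sc ≠ 0 then "" -- Python raises here (a string → TypeError); excluded by Pre_
  else
    let len_sc := cs.length / num_sc
    let ord := (PySem.List.sorted2 (weights.zip (List.range num_sc))
                 (fun p => p.1) (fun p => p.2) (order == "desc")).map Prod.snd
    String.ofList ((List.range cs.length).foldl
      (fun acc i => acc ++ [cs.getD (i % len_sc + ord.getD (i / len_sc) 0 * len_sc) ' ']) [])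

-- ===== PORT B =====
-- B's 'while s:' slicing loop. The L = 0 branch is a totality guard only: after the
-- divisibility check L = 0 forces cs = [], so it is never reached on admitted inputs.
def pvChunks (cs : List Char) (L : Nat) : List (List Char) :=
  if h : cs = [] then []
  else if h0 : L = 0 then [cs]
  else cs.take L :: pvChunks (cs.drop L) L
termination_by cs.length
decreasing_by
  have : 0 < cs.length := List.length_pos_iff.mpr h
  simp only [List.length_drop]
  omega

-- B: decorate chunks as (weight, (index, chunk)) triples, sort, join the chunk components.
-- Python compares the triples lexicographically; the (weight, index) prefixes are pairwise
-- distinct (indices are distinct), so the chunk component is never compared: sorted2 on the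
-- two keys weight and index is exact here.
def reorder_code_alt (bitstring : String) (weights : List Int) (order : String) : String :=
  let cs := bitstring.toList
  let num_sc := weights.length
  if cs.length % num_sc ≠ 0 then "" -- Python raises here; excluded by Pre_
  else
    let len_sc := cs.length / num_sc
    let decorated := PySem.List.sorted2
      (weights.zip ((List.range num_sc).zip (pvChunks cs len_sc)))
      (fun t => t.1) (fun t => t.2.1) (order == "desc")
    String.ofList (decorated.map (fun t => t.2.2)).flatten

-- ===== PRECONDITION & SPEC =====
-- Pre_ excludes exactly the inputs where Python A raises: empty weights (ZeroDivisionError on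
-- len(bitstring) % num_sc) and a bitstring length not divisible by len(weights) (A raises).
def Pre_reorder_code (bitstring : String) (weights : List Int) (order : String) : Prop :=
  weights ≠ [] ∧ bitstring.toList.length % weights.length = 0
instance (bitstring : String) (weights : List Int) (order : String) : Decidable (Pre_reorder_code bitstring weights order) := by unfold Pre_reorder_code; infer_instance
def pvWitness_reorder_code : String × List Int × String := ("abcd", [1, 2], "desc")
def Spec_reorder_code (bitstring : String) (weights : List Int) (order : String) (out : String) : Prop := out = reorder_code_alt bitstring weights order
instance (bitstring : String) (weights : List Int) (order : String) (out : String) : Decidable (Spec_reorder_code bitstring weights order out) := by unfold Spec_reorder_code; infer_instance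

-- ===== CLAIM (what is proved, stated in full; the proofs are below) =====
def Claim_equal_reorder_code : Prop := ∀ (bitstring : String) (weights : List Int) (order : String), Dom_reorder_code bitstring weights order → Pre_reorder_code bitstring weights order → Spec_reorder_code bitstring weights order (reorder_code bitstring weights order)

-- ===== LEMMAS AND PROOFS =====

-- A's whole loop equals the flattened list of permuted blocks of L consecutive source indices.
theorem pv_loop_eq_flatten (f : Nat → Char) (L : Nat) (p : List Nat) :
    (List.range (p.length * L)).foldl
        (fun acc i => acc ++ [f (i % L + p.getD (i / L) 0 * L)]) []
      = (p.map (fun j => (List.range L).map (fun r => f (r + j * L)))).flatten := by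
  rcases Nat.eq_zero_or_pos L with hL | hL
  · subst hL
    simp
  · induction p using List.reverseRecOn with
    | nil => simp
    | append_singleton q j ih =>
      have hlen : (q ++ [j]).length * L = q.length * L + L := by simp [Nat.add_mul]
      rw [hlen, List.range_add, List.foldl_append]
      have h1 : (List.range (q.length * L)).foldl
          (fun acc i => acc ++ [f (i % L + (q ++ [j]).getD (i / L) 0 * L)]) []
          = (q.map (fun j => (List.range L).map (fun r => f (r + j * L)))).flatten := by
        rw [PySem.List.foldl_congr_mem _ _
          (fun acc i => acc ++ [f (i % L + q.getD (i / L) 0 * L)]) _ ?_, ih]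
        intro acc i hi
        have hi' : i < q.length * L := List.mem_range.mp hi
        have hdiv : i / L < q.length := by
          rw [Nat.div_lt_iff_lt_mul hL]; omega
        rw [List.getD_append _ _ _ _ hdiv]
      rw [h1, List.foldl_map]
      have h2 : ∀ (acc : List Char),
          (List.range L).foldl (fun acc r =>
            acc ++ [f ((q.length * L + r) % L + (q ++ [j]).getD ((q.length * L + r) / L) 0 * L)]) acc
          = acc ++ (List.range L).map (fun r => f (r + j * L)) := by
        intro acc
        rw [PySem.List.foldl_congr_mem _ _ (fun acc r => acc ++ [f (r + j * L)]) _ ?_,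
          PySem.List.foldl_append_singleton_eq_map]
        intro a r hr
        have hr' : r < L := List.mem_range.mp hr
        have hmod : (q.length * L + r) % L = r := by
          rw [Nat.mul_add_mod']; exact Nat.mod_eq_of_lt hr'
        have hdiv : (q.length * L + r) / L = q.length := by
          rw [Nat.add_comm, Nat.add_mul_div_right _ _ hL, Nat.div_eq_of_lt hr', Nat.zero_add]
        rw [hmod, hdiv]
        have : (q ++ [j]).getD q.length 0 = j := by
          simp [List.getD]
        rw [this]
      rw [h2]
      simp

-- B's slicing loop produces exactly the n blocks of L consecutive characters.
theorem pv_chunks_eq (L : Nat) (hL : 0 < L) :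
    ∀ (n : Nat) (cs : List Char), cs.length = n * L →
    pvChunks cs L = (List.range n).map (fun k => (cs.drop (k * L)).take L) := by
  intro n
  induction n with
  | zero =>
    intro cs h
    have : cs = [] := List.eq_nil_of_length_eq_zero (by simpa using h)
    subst this
    simp [pvChunks]
  | succ m ih =>
    intro cs h
    have hne : cs ≠ [] := by
      intro hnil; subst hnil; simp at h; omega
    have hL0 : ¬ L = 0 := by omega
    rw [pvChunks, dif_neg hne, dif_neg hL0]
    have hdl : (cs.drop L).length = m * L := by
      simp only [List.length_drop, h, Nat.succ_mul]; omega
    rw [ih _ hdl, List.range_succ_eq_map, List.map_cons, List.map_map]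
    refine congrArg₂ _ (by simp) (List.map_congr_left ?_)
    intro k _
    simp [List.drop_drop, Nat.succ_mul, Nat.add_comm]

-- B's j-th chunk, written as the map A's j-th block produces.
theorem pv_chunk (cs : List Char) (L j : Nat) (h : (j + 1) * L ≤ cs.length) :
    (cs.drop (j * L)).take L = (List.range L).map (fun r => cs.getD (r + j * L) ' ') := by
  have h' : j * L + L ≤ cs.length := by rw [Nat.add_mul, one_mul] at h; omega
  apply List.ext_getElem
  · simp; omega
  · intro i h1 h2
    have hi : i < L := by simpa using h2
    have hidx : i + j * L < cs.length := by omega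
    simp [List.getD, List.getElem?_eq_getElem hidx, Nat.add_comm]

-- insertBy commutes with a map that preserves the comparison.
theorem pv_insertBy_map {α β : Type} (g : α → β) (b1 : α → α → Bool) (b2 : β → β → Bool)
    (h : ∀ a b, b2 (g a) (g b) = b1 a b) (x : α) (ys : List α) :
    PySem.List.insertBy b2 (g x) (ys.map g) = (PySem.List.insertBy b1 x ys).map g := by
  induction ys with
  | nil => simp [PySem.List.insertBy]
  | cons y ys ih =>
    simp only [List.map_cons, PySem.List.insertBy, h]
    split_ifs with hb
    · simp
    · simp [ih]

-- sorted2 commutes with a map that preserves both keys.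
theorem pv_sorted2_map {α β : Type} (g : α → β) (l : List α)
    (kA1 : α → Int) (kA2 : α → Nat) (kB1 : β → Int) (kB2 : β → Nat) (rev : Bool)
    (h1 : ∀ a, kB1 (g a) = kA1 a) (h2 : ∀ a, kB2 (g a) = kA2 a) :
    PySem.List.sorted2 (l.map g) kB1 kB2 rev = (PySem.List.sorted2 l kA1 kA2 rev).map g := by
  have hfold : ∀ (b2 : β → β → Bool) (b1 : α → α → Bool),
      (∀ a b, b2 (g a) (g b) = b1 a b) →
      ∀ (l : List α) (acc : List α),
        (l.map g).foldl (fun acc x => PySem.List.insertBy b2 x acc) (acc.map g)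
          = (l.foldl (fun acc x => PySem.List.insertBy b1 x acc) acc).map g := by
    intro b2 b1 h l
    induction l with
    | nil => intro acc; simp
    | cons x xs ih =>
      intro acc
      simp only [List.map_cons, List.foldl_cons]
      rw [pv_insertBy_map g b1 b2 h x acc]
      exact ih _
  unfold PySem.List.sorted2
  cases rev with
  | false =>
    simpa using hfold _ _ (fun a b => by simp [h1, h2]) l []
  | true =>
    simpa using hfold _ _ (fun a b => by simp [h1, h2]) l []

-- ===== VERDICT (by name: the statement is the Claim_ definition above) =====
theorem reorder_code_spec : Claim_equal_reorder_code := by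
  intro bitstring weights order _ hpre
  obtain ⟨hne, hmod⟩ := hpre
  unfold Spec_reorder_code reorder_code reorder_code_alt
  simp only [hmod, ne_eq, not_true_eq_false, if_false]
  set cs := bitstring.toList with hcs
  set n := weights.length with hn
  set L := cs.length / n with hLdef
  have hnpos : 0 < n := by
    cases weights with
    | nil => exact absurd rfl hne
    | cons a l => simp [hn]
  have hNL : cs.length = n * L := by
    rw [hLdef, Nat.mul_div_cancel' (Nat.dvd_of_mod_eq_zero hmod)]
  by_cases hcsnil : cs = []
  · rw [hcsnil]
    simp [pvChunks, PySem.List.sorted2]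
  · have hLpos : 0 < L := by
      rcases Nat.eq_zero_or_pos L with h0 | h
      · have hlen0 : cs.length = 0 := by rw [hNL, h0, Nat.mul_zero]
        exact absurd (List.eq_nil_of_length_eq_zero hlen0) hcsnil
      · exact h
    -- B's chunk list is the list of A's blocks
    have hchunks : pvChunks cs L
        = (List.range n).map (fun k => (List.range L).map (fun r => cs.getD (r + k * L) ' ')) := by
      rw [pv_chunks_eq L hLpos n cs hNL]
      refine List.map_congr_left ?_
      intro k hk
      exact pv_chunk cs L k (by
        have : k < n := List.mem_range.mp hk
        calc (k + 1) * L ≤ n * L := Nat.mul_le_mul_right L this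
        _ = cs.length := hNL.symm)
    set blockF : Nat → List Char := fun k => (List.range L).map (fun r => cs.getD (r + k * L) ' ') with hblock
    -- decorate = map of the (weight, index) pairs
    have hz : ∀ (l : List Nat), l.zip (l.map (fun i => blockF i))
        = l.map (fun i => (i, blockF i)) := by
      intro l
      induction l with
      | nil => simp
      | cons a t ih => simp [ih]
    have hdec : ∀ (ws : List Int) (l : List Nat),
        ws.zip (l.map (fun i => (i, blockF i)))
        = (ws.zip l).map (Prod.map id (fun i => (i, blockF i))) := by
      intro ws
      induction ws with
      | nil => intro l; simp
      | cons a t ih =>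
        intro l
        cases l with
        | nil => simp
        | cons b u => simp [ih]
    -- sort commutes with the decoration
    have hsort : PySem.List.sorted2
          ((weights.zip (List.range n)).map (Prod.map id (fun i => (i, blockF i))))
          (fun t => t.1) (fun t => t.2.1) (order == "desc")
        = (PySem.List.sorted2 (weights.zip (List.range n))
            (fun p => p.1) (fun p => p.2) (order == "desc")).map
            (Prod.map id (fun i => (i, blockF i))) := by
      exact pv_sorted2_map _ _ _ _ _ _ _ (fun a => rfl) (fun a => rfl)
    rw [hchunks, hz (List.range n), hdec weights (List.range n), hsort]
    set sp := PySem.List.sorted2 (weights.zip (List.range n))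
        (fun p : Int × Nat => p.1) (fun p : Int × Nat => p.2) (order == "desc") with hsp
    -- A side
    set p := sp.map Prod.snd with hp
    have hplen : p.length = n := by
      have hperm := (PySem.List.sorted2_perm (weights.zip (List.range n))
        (fun p : Int × Nat => p.1) (fun p : Int × Nat => p.2) (order == "desc")).length_eq
      rw [hp, List.length_map, hsp, hperm, List.length_zip, List.length_range, hn, Nat.min_self]
    have hNL' : cs.length = p.length * L := by rw [hplen]; exact hNL
    rw [hNL', pv_loop_eq_flatten (fun idx => cs.getD idx ' ') L p]
    refine congrArg String.ofList (congrArg List.flatten ?_)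
    rw [hp, List.map_map, List.map_map]
    rfl
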